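-- pv_equiv track=rewrite | github.com/chumingi/Baekjoon | LECTURE/joonlab/sec01_자료구조/sec01_03_딕셔너리/1089_학생_이름_찾기.py | solution
-- ===== SOURCE A (Python) =====
-- def solution(A, B):
--     # D: {key=학생이름, value=출현횟수} 형태의 사전
--     # B에 저장된 학생 이름을 순서대로 처리하면서 D를 만든다.
--     D = {}
--     for b in B:
--         if b in D:
--             D[b] += 1
--         else:
--             D[b] = 1
--
--     # A에 저장된 학생 이름 중에서 D에 없는 학생 이름을 answer에 넣는다.
--     answer = []
--     for a in A:
--         if a not in D:
--             answer.append(a)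
--     answer.sort()
--     return answer
-- ===== SOURCE B (Python) =====
-- def solution(A, B):
--     sA = sorted(A)
--     sB = sorted(set(B))
--     n = len(sB)
--     j = 0
--     out = []
--     for a in sA:
--         while j < n and sB[j] < a:
--             j += 1
--         if j == n or sB[j] != a:
--             out.append(a)
--     return out
-- ===== Notes on version B (the rewrite author's own statement) =====
-- stated objective: alternative
-- what changed: Replaces the dict-of-counts membership filter followed by a final sort with sort-both-sides two-pointer merge: sort A (keeping duplicates) and the distinct names of B, then a single linear sweep advances a pointer into sorted(B) and emits each A-name that does not match.
import Mathlib
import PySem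

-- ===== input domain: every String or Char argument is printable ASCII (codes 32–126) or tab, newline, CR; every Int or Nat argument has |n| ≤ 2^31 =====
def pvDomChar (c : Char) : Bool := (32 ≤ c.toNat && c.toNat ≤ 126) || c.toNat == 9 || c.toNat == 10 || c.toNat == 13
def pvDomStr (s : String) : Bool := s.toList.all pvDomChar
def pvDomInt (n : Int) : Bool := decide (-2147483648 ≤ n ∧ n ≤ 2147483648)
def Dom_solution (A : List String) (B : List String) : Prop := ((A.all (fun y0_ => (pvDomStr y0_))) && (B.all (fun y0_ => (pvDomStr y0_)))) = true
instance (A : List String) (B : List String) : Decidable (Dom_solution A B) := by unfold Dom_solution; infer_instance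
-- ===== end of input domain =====

-- B replaces A's dict-of-counts membership filter + final sort by a sort-both-sides two-pointer merge (alternative decomposition, same asymptotic cost).


-- ===== PORT A =====
def solution (A : List String) (B : List String) : List String :=
  let D := B.foldl
    (fun d b => if d.contains b then d.insert b (d.getD b 0 + 1) else d.insert b (1 : Int))
    PySem.Dict.empty
  let answer := A.foldl (fun acc a => if D.contains a then acc else acc ++ [a]) ([] : List String)
  PySem.List.sorted answer (fun x => x) false

-- ===== PORT B =====
-- the 'while j < n and sB[j] < a: j += 1' loop (the suffix of sB from j is the state)
def pvSkipLt (a : String) : List String → List String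
  | [] => []
  | y :: ys => if y < a then pvSkipLt a ys else y :: ys

def pvStep (st : List String × List String) (a : String) : List String × List String :=
  match pvSkipLt a st.2 with
  | [] => (st.1 ++ [a], [])
  | y :: t => if y ≠ a then (st.1 ++ [a], y :: t) else (st.1, y :: t)

def solution_alt (A : List String) (B : List String) : List String :=
  let sA := PySem.List.sorted A (fun x => x) false
  let sB := PySem.List.sorted (PySem.Set.ofList B) (fun x => x) false
  (sA.foldl pvStep (([] : List String), sB)).1

-- ===== PRECONDITION & SPEC =====
def Spec_solution (A : List String) (B : List String) (out : List String) : Prop := out = solution_alt A B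
instance (A : List String) (B : List String) (out : List String) : Decidable (Spec_solution A B out) := by unfold Spec_solution; infer_instance

-- ===== CLAIM (what is proved, stated in full; the proofs are below) =====
def Claim_equal_solution : Prop := ∀ (A : List String) (B : List String), Dom_solution A B → Spec_solution A B (solution A B)

-- ===== LEMMAS AND PROOFS =====

-- A's dict fold: membership among the keys is membership in B
lemma containsD (B : List String) (d : PySem.Dict String Int) (a : String) :
    (B.foldl (fun d b => if d.contains b then d.insert b (d.getD b 0 + 1) else d.insert b (1 : Int)) d).contains a
      = (d.contains a || decide (a ∈ B)) := by
  induction B generalizing d with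
  | nil => simp
  | cons b B ih =>
    simp only [List.foldl_cons, ih]
    by_cases hab : a = b
    · subst hab
      by_cases hc : d.contains a = true <;> simp [hc]
    · have hb : (a == b) = false := by simp [hab]
      by_cases hc : d.contains b = true <;>
        simp [hc, PySem.Dict.contains_insert, hb, hab]

lemma skip_pairwise (a : String) (ys : List String) (h : ys.Pairwise (· ≤ ·)) :
    (pvSkipLt a ys).Pairwise (· ≤ ·) := by
  induction ys with
  | nil => simp [pvSkipLt]
  | cons y t ih =>
    rw [List.pairwise_cons] at h
    unfold pvSkipLt
    split
    · exact ih h.2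
    · exact List.pairwise_cons.2 h

lemma mem_skip (a x : String) (ys : List String) (h : ys.Pairwise (· ≤ ·)) (hax : a ≤ x) :
    (x ∈ pvSkipLt a ys) ↔ x ∈ ys := by
  induction ys with
  | nil => simp [pvSkipLt]
  | cons y t ih =>
    rw [List.pairwise_cons] at h
    unfold pvSkipLt
    split
    · rename_i hy
      rw [ih h.2]
      have : x ≠ y := fun he => absurd (lt_of_lt_of_le hy hax) (by simp [he])
      simp [this]
    · rfl

lemma skip_head_not_lt (a y : String) (t ys : List String) (h : pvSkipLt a ys = y :: t) :
    ¬ y < a := by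
  induction ys with
  | nil => simp [pvSkipLt] at h
  | cons z s ih =>
    unfold pvSkipLt at h
    split at h
    · exact ih h
    · rename_i hz; cases h; exact hz

lemma mem_skip_head (a y : String) (t ys : List String) (hys : ys.Pairwise (· ≤ ·))
    (h : pvSkipLt a ys = y :: t) (hmem : a ∈ y :: t) : y = a := by
  have hp : (y :: t).Pairwise (· ≤ ·) := h ▸ skip_pairwise a ys hys
  have hya : a ≤ y := le_of_not_gt (skip_head_not_lt a y t ys h)
  rcases List.mem_cons.1 hmem with he | hmt
  · exact he.symm
  · exact le_antisymm ((List.pairwise_cons.1 hp).1 a hmt) hya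

-- the two-pointer sweep computes the membership filter against the current suffix
lemma foldl_pvStep (xs : List String) : ∀ (ys acc : List String),
    xs.Pairwise (· ≤ ·) → ys.Pairwise (· ≤ ·) →
    (xs.foldl pvStep (acc, ys)).1 = acc ++ xs.filter (fun x => !decide (x ∈ ys)) := by
  induction xs with
  | nil => intro ys acc _ _; simp
  | cons a as ih =>
    intro ys acc hxs hys
    rw [List.pairwise_cons] at hxs
    have hmema : (a ∈ pvSkipLt a ys) ↔ a ∈ ys := mem_skip a a ys hys le_rfl
    have hmemas : ∀ x ∈ as, (decide (x ∈ pvSkipLt a ys) : Bool) = decide (x ∈ ys) := by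
      intro x hx; simp [mem_skip a x ys hys (hxs.1 x hx)]
    have hps : (pvSkipLt a ys).Pairwise (· ≤ ·) := skip_pairwise a ys hys
    have hrest : ∀ acc', (as.foldl pvStep (acc', pvSkipLt a ys)).1
        = acc' ++ as.filter (fun x => !decide (x ∈ ys)) := by
      intro acc'
      rw [ih (pvSkipLt a ys) acc' hxs.2 hps]
      congr 1
      exact List.filter_congr (fun x hx => by rw [hmemas x hx])
    rw [List.foldl_cons]
    cases hsk : pvSkipLt a ys with
    | nil =>
      have hna : a ∉ ys := fun hm => by simp [hsk] at hmema; exact hmema hm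
      have hstep : pvStep (acc, ys) a = (acc ++ [a], []) := by simp [pvStep, hsk]
      rw [hsk] at hrest
      rw [hstep, hrest, List.filter_cons]
      simp [hna]
    | cons y t =>
      rw [hsk] at hrest
      by_cases hya : y = a
      · have hain : a ∈ ys := hmema.1 (hsk ▸ (hya ▸ List.mem_cons_self))
        have hstep : pvStep (acc, ys) a = (acc, y :: t) := by simp [pvStep, hsk, hya]
        rw [hstep, hrest, List.filter_cons]
        simp [hain]
      · have hna : a ∉ ys := by
          intro hm
          exact hya (mem_skip_head a y t ys hys hsk (hsk ▸ hmema.2 hm))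
        have hstep : pvStep (acc, ys) a = (acc ++ [a], y :: t) := by simp [pvStep, hsk, hya]
        rw [hstep, hrest, List.filter_cons]
        simp [hna]

-- filtering commutes with the (stable) sort for the identity key
lemma filter_sorted (A : List String) (p : String → Bool) :
    (PySem.List.sorted A (fun x => x) false).filter p
      = PySem.List.sorted (A.filter p) (fun x => x) false := by
  exact (PySem.List.sorted_id_eq_of_perm_of_pairwise (A.filter p)
    ((PySem.List.sorted A (fun x => x) false).filter p)
    ((PySem.List.sorted_perm A (fun x => x) false).filter p)
    ((PySem.List.sorted_pairwise A (fun x => x)).filter p)).symm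

-- ===== VERDICT (by name: the statement is the Claim_ definition above) =====
theorem solution_spec : Claim_equal_solution := by
  intro A B _
  unfold Spec_solution solution solution_alt
  simp only []
  rw [foldl_pvStep _ _ _ (PySem.List.sorted_pairwise A (fun x => x))
        (PySem.List.sorted_pairwise (PySem.Set.ofList B) (fun x => x))]
  rw [List.nil_append]
  have h1 : (PySem.List.sorted A (fun x => x) false).filter
      (fun x => !decide (x ∈ PySem.List.sorted (PySem.Set.ofList B) (fun x => x) false))
      = (PySem.List.sorted A (fun x => x) false).filter (fun x => !decide (x ∈ B)) := by
    apply List.filter_congr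
    intro x _
    simp [PySem.List.mem_sorted, PySem.Set.mem_ofList]
  rw [h1, filter_sorted]
  congr 1
  have h2 : ∀ acc, (A.foldl (fun acc a =>
      if (B.foldl (fun d b => if d.contains b then d.insert b (d.getD b 0 + 1) else d.insert b (1 : Int)) PySem.Dict.empty).contains a
      then acc else acc ++ [a]) acc) = acc ++ A.filter (fun a => !decide (a ∈ B)) := by
    intro acc
    have := PySem.List.foldl_congr_mem' (l := A) (init := acc)
      (f := fun acc a =>
        if (B.foldl (fun d b => if d.contains b then d.insert b (d.getD b 0 + 1) else d.insert b (1 : Int)) PySem.Dict.empty).contains a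
        then acc else acc ++ [a])
      (g := fun acc a => if !decide (a ∈ B) then acc ++ [a] else acc)
      (by intro x _ acc'
          simp only [containsD]
          by_cases hx : x ∈ B <;> simp [hx])
    rw [this, PySem.List.foldl_append_if_eq_filter]
  rw [h2]
  simp
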